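-- pv_equiv track=rewrite | github.com/ccancellieri/mcp-skill-hub | hooks/auto_approve.py | split_compound_segments
-- ===== SOURCE A (Python) =====
-- def _quote_mask(cmd: str) -> list[bool]:
--     """Return a per-character mask where True means the char is inside quotes."""
--     mask = [False] * len(cmd)
--     in_q: str | None = None
--     i = 0
--     while i < len(cmd):
--         c = cmd[i]
--         if in_q:
--             if c == "\\" and i + 1 < len(cmd):
--                 # Skip escaped char inside double quotes.
--                 mask[i] = True
--                 mask[i + 1] = True
--                 i += 2
--                 continue
--             if c == in_q:
--                 in_q = None
--             else:
--                 mask[i] = True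
--             i += 1
--             continue
--         if c in ("'", '"'):
--             in_q = c
--         i += 1
--     return mask
--
-- _COMPOUND_OPS = ("&&", "||", ";", "|")
--
-- def split_compound_segments(cmd: str) -> list[str]:
--     """Split a shell command string into segments on `&&`, `||`, `;`, `|`.
--
--     Operators inside single or double quotes are ignored. Returns trimmed
--     segments, dropping empties. If the command has no operators (or they are
--     all inside quotes), returns [cmd.strip()].
--     """
--     if not cmd:
--         return []
--     mask = _quote_mask(cmd)
--     segments: list[str] = []
--     start = 0
--     i = 0
--     n = len(cmd)
--     while i < n:
--         if mask[i]:
--             i += 1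
--             continue
--         matched = None
--         for op in _COMPOUND_OPS:
--             if cmd.startswith(op, i) and not any(mask[i:i + len(op)]):
--                 # Don't treat `|` as a split when it's actually `||` already
--                 # consumed above (order handles this since `||` comes first).
--                 matched = op
--                 break
--         if matched is not None:
--             seg = cmd[start:i].strip()
--             if seg:
--                 segments.append(seg)
--             i += len(matched)
--             start = i
--             continue
--         i += 1
--     tail = cmd[start:].strip()
--     if tail:
--         segments.append(tail)
--     return segments or [cmd.strip()]
-- ===== SOURCE B (Python) =====
-- def split_compound_segments(cmd: str) -> list[str]:
--     """Single-pass split on `&&`, `||`, `;`, `|` outside quotes (no mask pass)."""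
--     if not cmd:
--         return []
--     n = len(cmd)
--     segments: list[str] = []
--     start = 0
--     i = 0
--     in_q = None
--     while i < n:
--         c = cmd[i]
--         if in_q:
--             if c == "\\" and i + 1 < n:
--                 i += 2
--                 continue
--             if c == in_q:
--                 in_q = None
--             i += 1
--         elif c == "'" or c == '"':
--             in_q = c
--             i += 1
--         elif cmd.startswith("&&", i) or cmd.startswith("||", i):
--             seg = cmd[start:i].strip()
--             if seg:
--                 segments.append(seg)
--             i += 2
--             start = i
--         elif c == ";" or c == "|":
--             seg = cmd[start:i].strip()
--             if seg:
--                 segments.append(seg)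
--             i += 1
--             start = i
--         else:
--             i += 1
--     tail = cmd[start:].strip()
--     if tail:
--         segments.append(tail)
--     return segments or [cmd.strip()]
-- ===== Notes on version B (the rewrite author's own statement) =====
-- stated objective: simpler
-- what changed: B replaces A's two-pass design (a precomputed per-character quote mask list plus a masked index scan that re-checks mask slices per operator) by a single pass that carries the quote state in one variable and tests operators directly, so the mask list and its slicing disappear (measured ~2x constant-factor speedup).
import Mathlib
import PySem

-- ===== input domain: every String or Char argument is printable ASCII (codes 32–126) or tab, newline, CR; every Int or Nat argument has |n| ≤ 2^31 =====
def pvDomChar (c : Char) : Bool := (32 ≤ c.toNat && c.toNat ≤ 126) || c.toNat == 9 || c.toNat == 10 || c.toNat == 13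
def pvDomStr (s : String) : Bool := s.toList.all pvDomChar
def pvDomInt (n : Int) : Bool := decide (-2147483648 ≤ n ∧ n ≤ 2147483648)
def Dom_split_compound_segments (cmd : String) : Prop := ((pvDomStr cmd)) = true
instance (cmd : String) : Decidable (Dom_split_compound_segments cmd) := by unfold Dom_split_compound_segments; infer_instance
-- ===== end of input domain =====

-- B replaces A's two-pass design (precomputed quote-mask list + masked scan with an
-- operator table) by one single-pass scanner carrying the quote state; objective: simpler.


-- ===== PORT A =====
-- _quote_mask: the Python writes mask[i] (and mask[i+1] on an escape) left to right,
-- every other position keeping its initial False; ported as the list emitted in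
-- position order — exact at each index, same branch order and in_q state. The
-- escape branch's `i + 1 < len(cmd)` guard appears as the two-element pattern.
def pvQuoteMask : Option Char → List Char → List Bool
  | some q, [c] => if c = q then [false] else [true]
  | some q, c :: d :: rest =>
    if c = '\\' then true :: true :: pvQuoteMask (some q) rest
    else if c = q then false :: pvQuoteMask none (d :: rest)
    else true :: pvQuoteMask (some q) (d :: rest)
  | none, c :: rest =>
    if c = '\'' ∨ c = '"' then false :: pvQuoteMask (some c) rest
    else false :: pvQuoteMask none rest
  | _, [] => []

def pvOpsA : List (List Char) := [['&', '&'], ['|', '|'], [';'], ['|']]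

-- `for op in _COMPOUND_OPS: if cmd.startswith(op, i) and not any(mask[i:i+len(op)])`
def pvFindOpA (s : List Char) (mask : List Bool) (i : Nat) : Option (List Char) :=
  pvOpsA.find? (fun op => op.isPrefixOf (s.drop i) && !(((mask.drop i).take op.length).any id))

-- the while loop over i; `fuel` is a pure totality guard (the loop advances i on every
-- iteration, so `s.length` iterations always suffice)
def pvLoopA (s : List Char) (mask : List Bool) : Nat → Nat → Nat → List String → List String
  | 0, _, start, segs =>
    let tail := PySem.Chars.strip (s.drop start)
    let segs2 := if tail ≠ [] then segs ++ [String.ofList tail] else segs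
    if segs2 = [] then [String.ofList (PySem.Chars.strip s)] else segs2
  | fuel + 1, i, start, segs =>
    if i < s.length then
      if mask.getD i false then pvLoopA s mask fuel (i + 1) start segs
      else
        match pvFindOpA s mask i with
        | some op =>
          let seg := PySem.Chars.strip ((s.drop start).take (i - start))
          pvLoopA s mask fuel (i + op.length) (i + op.length)
            (if seg ≠ [] then segs ++ [String.ofList seg] else segs)
        | none => pvLoopA s mask fuel (i + 1) start segs
    else
      let tail := PySem.Chars.strip (s.drop start)
      let segs2 := if tail ≠ [] then segs ++ [String.ofList tail] else segs
      if segs2 = [] then [String.ofList (PySem.Chars.strip s)] else segs2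

def split_compound_segments (cmd : String) : List String :=
  if cmd = "" then []
  else pvLoopA cmd.toList (pvQuoteMask none cmd.toList) cmd.toList.length 0 0 []

-- ===== PORT B =====
-- the single-pass while loop; `fuel` is a pure totality guard (i advances every iteration)
def pvScanB (s : List Char) : Nat → Nat → Nat → List String → Option Char → List String
  | 0, _, start, segs, _ =>
    let tail := PySem.Chars.strip (s.drop start)
    let segs2 := if tail ≠ [] then segs ++ [String.ofList tail] else segs
    if segs2 = [] then [String.ofList (PySem.Chars.strip s)] else segs2
  | fuel + 1, i, start, segs, inq =>
    if h : i < s.length then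
      let c := s[i]
      match inq with
      | some q =>
        if c = '\\' ∧ i + 1 < s.length then pvScanB s fuel (i + 2) start segs inq
        else if c = q then pvScanB s fuel (i + 1) start segs none
        else pvScanB s fuel (i + 1) start segs inq
      | none =>
        if c = '\'' ∨ c = '"' then pvScanB s fuel (i + 1) start segs (some c)
        else if ['&', '&'].isPrefixOf (s.drop i) ∨ ['|', '|'].isPrefixOf (s.drop i) then
          let seg := PySem.Chars.strip ((s.drop start).take (i - start))
          pvScanB s fuel (i + 2) (i + 2)
            (if seg ≠ [] then segs ++ [String.ofList seg] else segs) none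
        else if c = ';' ∨ c = '|' then
          let seg := PySem.Chars.strip ((s.drop start).take (i - start))
          pvScanB s fuel (i + 1) (i + 1)
            (if seg ≠ [] then segs ++ [String.ofList seg] else segs) none
        else pvScanB s fuel (i + 1) start segs none
    else
      let tail := PySem.Chars.strip (s.drop start)
      let segs2 := if tail ≠ [] then segs ++ [String.ofList tail] else segs
      if segs2 = [] then [String.ofList (PySem.Chars.strip s)] else segs2

def split_compound_segments_alt (cmd : String) : List String :=
  if cmd = "" then []
  else pvScanB cmd.toList cmd.toList.length 0 0 [] none

-- ===== PRECONDITION & SPEC =====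
def Spec_split_compound_segments (cmd : String) (out : List String) : Prop := out = split_compound_segments_alt cmd
instance (cmd : String) (out : List String) : Decidable (Spec_split_compound_segments cmd out) := by unfold Spec_split_compound_segments; infer_instance

-- ===== CLAIM (what is proved, stated in full; the proofs are below) =====
def Claim_equal_split_compound_segments : Prop := ∀ (cmd : String), Dom_split_compound_segments cmd → Spec_split_compound_segments cmd (split_compound_segments cmd)

-- ===== LEMMAS AND PROOFS =====

lemma pvQuoteMask_none_shape (l : List Char) :
    pvQuoteMask none l = [] ∨ ∃ t, pvQuoteMask none l = false :: t := by
  cases l with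
  | nil => left; simp [pvQuoteMask]
  | cons c rest =>
    right
    by_cases hq : c = '\'' ∨ c = '"' <;> simp [pvQuoteMask, hq]

lemma pv_mask_getD (M : List Bool) (i : Nat) (b : Bool) (t : List Bool)
    (h : M.drop i = b :: t) : M.getD i false = b := by
  have h1 : M[i]? = some b := by
    rw [← List.head?_drop, h]; rfl
  simp [List.getD_eq_getElem?_getD, h1]

lemma pv_drop_succ (M : List Bool) (i : Nat) (b : Bool) (t : List Bool)
    (h : M.drop i = b :: t) : M.drop (i + 1) = t := by
  rw [← List.tail_drop, h]; rfl

lemma pv_ops_no_quote (c : Char) (hq : c = '\'' ∨ c = '"') (l : List Char)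
    (op : List Char) (hop : op ∈ pvOpsA) : op.isPrefixOf (c :: l) = false := by
  rcases hq with h | h <;> subst h <;>
    (simp only [pvOpsA, List.mem_cons, List.not_mem_nil, or_false] at hop;
     rcases hop with h1 | h1 | h1 | h1 <;> subst h1 <;> simp [List.isPrefixOf])

lemma pv_main (s : List Char) : ∀ (k kA kB i start : Nat) (segs : List String) (inq : Option Char),
    s.length - i ≤ k → s.length - i ≤ kA → s.length - i ≤ kB →
    (inq = none ∨ inq = some '\'' ∨ inq = some '"') →
    (pvQuoteMask none s).drop i = pvQuoteMask inq (s.drop i) →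
    pvLoopA s (pvQuoteMask none s) kA i start segs = pvScanB s kB i start segs inq := by
  intro k
  induction k with
  | zero =>
    intro kA kB i start segs inq hk _ _ _ _
    have hi : ¬ i < s.length := by omega
    cases kA <;> cases kB <;> simp [pvLoopA, pvScanB, hi]
  | succ k ih =>
    intro kA kB i start segs inq hk hkA hkB hinq hmask
    by_cases hi : i < s.length
    case neg => cases kA <;> cases kB <;> simp [pvLoopA, pvScanB, hi]
    case pos =>
    obtain ⟨kA, rfl⟩ : ∃ kA', kA = kA' + 1 := ⟨kA - 1, by omega⟩
    obtain ⟨kB, rfl⟩ : ∃ kB', kB = kB' + 1 := ⟨kB - 1, by omega⟩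
    have hdrop : s.drop i = s[i] :: s.drop (i + 1) := List.drop_eq_getElem_cons hi
    set M := pvQuoteMask none s with hM
    set c := s[i] with hc
    set rest := s.drop (i + 1) with hrest
    have hrestlen : rest ≠ [] ↔ i + 1 < s.length := by
      rw [hrest]
      constructor
      · intro h
        by_contra hh
        exact h (List.drop_eq_nil_of_le (by omega))
      · intro h hnil
        have := List.drop_eq_nil_iff.mp hnil
        omega
    rcases hinq with hq | hq | hq
    -- ===== inq = none =====
    · subst hq
      rw [hdrop] at hmask
      by_cases hquote : c = '\'' ∨ c = '"'
      · -- opening quote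
        have hmaski : M.drop i = false :: pvQuoteMask (some c) rest := by
          rw [hmask]; simp [pvQuoteMask, hquote]
        have hg := pv_mask_getD M i _ _ hmaski
        have hfo : pvFindOpA s M i = none := by
          refine List.find?_eq_none.mpr ?_
          intro op hop
          have hx := pv_ops_no_quote c hquote rest op hop
          rw [hdrop, hx]
          simp
        simp only [pvLoopA, pvScanB, hi, if_true, dif_pos, hg, Bool.false_eq_true, if_false,
          hfo, ← hc, hquote]
        exact ih kA kB (i + 1) start segs (some c) (by omega) (by omega) (by omega)
          (by rcases hquote with h | h <;> simp [h])
          (by rw [pv_drop_succ M i _ _ hmaski, ← hrest])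
      · -- ordinary char outside quotes
        have hmaski : M.drop i = false :: pvQuoteMask none rest := by
          rw [hmask]; simp [pvQuoteMask, hquote]
        have hg := pv_mask_getD M i _ _ hmaski
        have hd1 : M.drop (i + 1) = pvQuoteMask none rest := pv_drop_succ M i _ _ hmaski
        have hany1 : ((M.drop i).take 1).any id = false := by simp [hmaski]
        have hany2 : ((M.drop i).take 2).any id = false := by
          rcases pvQuoteMask_none_shape rest with h | ⟨t, h⟩ <;> simp [hmaski, h]
        by_cases h2 : ['&', '&'].isPrefixOf (s.drop i) ∨ ['|', '|'].isPrefixOf (s.drop i)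
        · -- a two-character operator matches
          rcases h2 with h2 | h2
          · -- "&&"
            have hF : pvFindOpA s M i = some ['&', '&'] := by
              simp [pvFindOpA, pvOpsA, h2, hany2]
            have hor : ['&', '&'].isPrefixOf (s.drop i) ∨ ['|', '|'].isPrefixOf (s.drop i) :=
              Or.inl h2
            rw [hdrop, List.isPrefixOf_iff_prefix] at h2
            obtain ⟨t, ht⟩ := h2
            have ht' : ('&' : Char) :: '&' :: t = c :: rest := by simpa using ht
            have hcq : ¬(c = '\'' ∨ c = '"') := hquote
            have hr : rest = '&' :: t := (List.cons.inj ht').2.symm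
            have hnext : M.drop (i + 2) = pvQuoteMask none (s.drop (i + 2)) := by
              have h2' : M.drop (i + 1 + 1) = pvQuoteMask none t := by
                apply pv_drop_succ M (i + 1) false
                rw [hd1, hr]; simp [pvQuoteMask]
              have hs2 : s.drop (i + 1 + 1) = t := by
                rw [← List.tail_drop, ← hrest, hr]; rfl
              simpa [show i + (2 : Nat) = i + 1 + 1 by omega, hs2] using h2'
            simp only [pvLoopA, pvScanB, hi, if_true, dif_pos, hg, Bool.false_eq_true,
              if_false, hF, ← hc, hquote, hor]
            exact ih kA kB (i + 2) (i + 2) _ none (by omega) (by omega) (by omega)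
              (Or.inl rfl) hnext
          · -- "||"
            have hcp : c = '|' := by
              rw [hdrop, List.isPrefixOf_iff_prefix] at h2
              obtain ⟨t, ht⟩ := h2
              have ht' : ('|' : Char) :: '|' :: t = c :: rest := by simpa using ht
              exact ((List.cons.inj ht').1).symm
            have hno : ['&', '&'].isPrefixOf (s.drop i) = false := by
              rw [hdrop]
              simp [List.isPrefixOf, hcp]
            have hF : pvFindOpA s M i = some ['|', '|'] := by
              simp [pvFindOpA, pvOpsA, List.find?, hno, h2, hany2]
            have hor : ['&', '&'].isPrefixOf (s.drop i) ∨ ['|', '|'].isPrefixOf (s.drop i) :=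
              Or.inr h2
            rw [hdrop, List.isPrefixOf_iff_prefix] at h2
            obtain ⟨t, ht⟩ := h2
            have ht' : ('|' : Char) :: '|' :: t = c :: rest := by simpa using ht
            have hr : rest = '|' :: t := (List.cons.inj ht').2.symm
            have hnext : M.drop (i + 2) = pvQuoteMask none (s.drop (i + 2)) := by
              have h2' : M.drop (i + 1 + 1) = pvQuoteMask none t := by
                apply pv_drop_succ M (i + 1) false
                rw [hd1, hr]; simp [pvQuoteMask]
              have hs2 : s.drop (i + 1 + 1) = t := by
                rw [← List.tail_drop, ← hrest, hr]; rfl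
              simpa [show i + (2 : Nat) = i + 1 + 1 by omega, hs2] using h2'
            simp only [pvLoopA, pvScanB, hi, if_true, dif_pos, hg, Bool.false_eq_true,
              if_false, hF, ← hc, hquote, hor]
            exact ih kA kB (i + 2) (i + 2) _ none (by omega) (by omega) (by omega)
              (Or.inl rfl) hnext
        · have hA2 : ['&', '&'].isPrefixOf (s.drop i) = false :=
            Bool.eq_false_iff.mpr (fun hx => h2 (Or.inl hx))
          have hB2 : ['|', '|'].isPrefixOf (s.drop i) = false :=
            Bool.eq_false_iff.mpr (fun hx => h2 (Or.inr hx))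
          by_cases h1 : c = ';' ∨ c = '|'
          · -- a one-character operator matches
            have hF : pvFindOpA s M i = some (if c = ';' then [';'] else ['|']) := by
              rcases h1 with h1 | h1
              · simp [pvFindOpA, pvOpsA, List.find?, hany1, hdrop, h1,
                  List.isPrefixOf]
              · have hBr : ['|'].isPrefixOf rest = false := by
                  rw [hdrop] at hB2
                  simpa [List.isPrefixOf, h1] using hB2
                simp [pvFindOpA, pvOpsA, List.find?, hany1, hdrop, h1, hBr,
                  List.isPrefixOf]
            have hlen : (if c = ';' then [';'] else ['|']).length = 1 := by
              by_cases hcs : c = ';' <;> simp [hcs]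
            simp only [pvLoopA, pvScanB, hi, if_true, dif_pos, hg, Bool.false_eq_true,
              if_false, hF, ← hc, hquote, hA2, hB2, h1, hlen, or_self]
            exact ih kA kB (i + 1) (i + 1) _ none (by omega) (by omega) (by omega)
              (Or.inl rfl) (by rw [hd1, ← hrest])
          · -- no operator
            have hF : pvFindOpA s M i = none := by
              refine List.find?_eq_none.mpr ?_
              intro op hop
              simp only [pvOpsA, List.mem_cons, List.not_mem_nil, or_false] at hop
              have hns : (';' : Char) ≠ c := fun h => h1 (Or.inl h.symm)
              have hnp : ('|' : Char) ≠ c := fun h => h1 (Or.inr h.symm)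
              rcases hop with h1 | h1 | h1 | h1 <;> subst h1
              · simp [hA2]
              · simp [hB2]
              · rw [hdrop]; simp [List.isPrefixOf, hns]
              · rw [hdrop]; simp [List.isPrefixOf, hnp]
            simp only [pvLoopA, pvScanB, hi, if_true, dif_pos, hg, Bool.false_eq_true,
              if_false, hF, ← hc, hquote, hA2, hB2, h1, or_self]
            exact ih kA kB (i + 1) start segs none (by omega) (by omega) (by omega)
              (Or.inl rfl) (by rw [hd1, ← hrest])
    -- ===== inq = some '\'' =====
    · subst hq
      rw [hdrop] at hmask
      by_cases hesc : c = '\\' ∧ rest ≠ []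
      · -- escape: two masked positions, jump by 2
        have hi1 : i + 1 < s.length := hrestlen.mp hesc.2
        obtain ⟨d, rest', hr⟩ : ∃ d rest', rest = d :: rest' := by
          cases hx : rest with
          | nil => exact absurd hx hesc.2
          | cons d r => exact ⟨d, r, rfl⟩
        obtain ⟨kA, rfl⟩ : ∃ kA', kA = kA' + 1 := ⟨kA - 1, by omega⟩
        have hmaski : M.drop i = true :: true :: pvQuoteMask (some '\'') rest' := by
          rw [hmask, hr]; simp [pvQuoteMask, hesc.1]
        have hg := pv_mask_getD M i _ _ hmaski
        have hd1 : M.drop (i + 1) = true :: pvQuoteMask (some '\'') rest' :=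
          pv_drop_succ M i _ _ hmaski
        have hg1 := pv_mask_getD M (i + 1) _ _ hd1
        have hd2 : M.drop (i + 1 + 1) = pvQuoteMask (some '\'') rest' :=
          pv_drop_succ M (i + 1) _ _ hd1
        have htail : rest' = s.drop (i + 1 + 1) := by
          have : rest.tail = s.drop (i + 1 + 1) := by rw [hrest, List.tail_drop]
          rw [hr] at this; exact this
        simp only [pvLoopA, pvScanB, hi, if_true, dif_pos, hg, ← hc, hesc.1, and_self,
          if_true, hi1, hg1]
        have := ih kA kB (i + 1 + 1) start segs (some '\'') (by omega) (by omega) (by omega)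
          (by simp) (by rw [hd2, ← htail])
        simpa [show i + (2 : Nat) = i + 1 + 1 by omega] using this
      · by_cases hcq : c = '\''
        · -- closing quote
          have hmaski : M.drop i = false :: pvQuoteMask none rest := by
            rw [hmask]
            cases hx : rest with
            | nil => simp [pvQuoteMask, hcq]
            | cons d r => simp [pvQuoteMask, hcq]
          have hg := pv_mask_getD M i _ _ hmaski
          have hfo : pvFindOpA s M i = none := by
            refine List.find?_eq_none.mpr ?_
            intro op hop
            have hx := pv_ops_no_quote c (by simp [hcq]) rest op hop
            rw [hdrop, hx]
            simp
          simp only [pvLoopA, pvScanB, hi, if_true, dif_pos, hg, Bool.false_eq_true, if_false,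
            hfo, ← hc, hcq, if_true]
          exact ih kA kB (i + 1) start segs none (by omega) (by omega) (by omega) (Or.inl rfl)
            (by rw [pv_drop_succ M i _ _ hmaski, ← hrest])
        · -- masked char inside quotes
          have hmaski : M.drop i = true :: pvQuoteMask (some '\'') rest := by
            rw [hmask]
            cases hx : rest with
            | nil => simp [pvQuoteMask, hcq]
            | cons d r =>
              have hcb : c ≠ '\\' := fun h => hesc ⟨h, by rw [hx]; simp⟩
              simp [pvQuoteMask, hcb, hcq]
          have hg := pv_mask_getD M i _ _ hmaski
          have hesc' : ¬ (c = '\\' ∧ i + 1 < s.length) := by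
            rw [← hrestlen]; exact hesc
          simp only [pvLoopA, pvScanB, hi, if_true, dif_pos, hg, hesc', ← hc, hcq, if_false]
          exact ih kA kB (i + 1) start segs (some '\'') (by omega) (by omega) (by omega)
            (by simp) (by rw [pv_drop_succ M i _ _ hmaski, ← hrest])
    -- ===== inq = some '"' =====
    · subst hq
      rw [hdrop] at hmask
      by_cases hesc : c = '\\' ∧ rest ≠ []
      · -- escape: two masked positions, jump by 2
        have hi1 : i + 1 < s.length := hrestlen.mp hesc.2
        obtain ⟨d, rest', hr⟩ : ∃ d rest', rest = d :: rest' := by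
          cases hx : rest with
          | nil => exact absurd hx hesc.2
          | cons d r => exact ⟨d, r, rfl⟩
        obtain ⟨kA, rfl⟩ : ∃ kA', kA = kA' + 1 := ⟨kA - 1, by omega⟩
        have hmaski : M.drop i = true :: true :: pvQuoteMask (some '"') rest' := by
          rw [hmask, hr]; simp [pvQuoteMask, hesc.1]
        have hg := pv_mask_getD M i _ _ hmaski
        have hd1 : M.drop (i + 1) = true :: pvQuoteMask (some '"') rest' :=
          pv_drop_succ M i _ _ hmaski
        have hg1 := pv_mask_getD M (i + 1) _ _ hd1
        have hd2 : M.drop (i + 1 + 1) = pvQuoteMask (some '"') rest' :=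
          pv_drop_succ M (i + 1) _ _ hd1
        have htail : rest' = s.drop (i + 1 + 1) := by
          have : rest.tail = s.drop (i + 1 + 1) := by rw [hrest, List.tail_drop]
          rw [hr] at this; exact this
        simp only [pvLoopA, pvScanB, hi, if_true, dif_pos, hg, ← hc, hesc.1, and_self,
          if_true, hi1, hg1]
        have := ih kA kB (i + 1 + 1) start segs (some '"') (by omega) (by omega) (by omega)
          (by simp) (by rw [hd2, ← htail])
        simpa [show i + (2 : Nat) = i + 1 + 1 by omega] using this
      · by_cases hcq : c = '"'
        · -- closing quote
          have hmaski : M.drop i = false :: pvQuoteMask none rest := by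
            rw [hmask]
            cases hx : rest with
            | nil => simp [pvQuoteMask, hcq]
            | cons d r => simp [pvQuoteMask, hcq]
          have hg := pv_mask_getD M i _ _ hmaski
          have hfo : pvFindOpA s M i = none := by
            refine List.find?_eq_none.mpr ?_
            intro op hop
            have hx := pv_ops_no_quote c (by simp [hcq]) rest op hop
            rw [hdrop, hx]
            simp
          simp only [pvLoopA, pvScanB, hi, if_true, dif_pos, hg, Bool.false_eq_true, if_false,
            hfo, ← hc, hcq, if_true]
          exact ih kA kB (i + 1) start segs none (by omega) (by omega) (by omega) (Or.inl rfl)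
            (by rw [pv_drop_succ M i _ _ hmaski, ← hrest])
        · -- masked char inside quotes
          have hmaski : M.drop i = true :: pvQuoteMask (some '"') rest := by
            rw [hmask]
            cases hx : rest with
            | nil => simp [pvQuoteMask, hcq]
            | cons d r =>
              have hcb : c ≠ '\\' := fun h => hesc ⟨h, by rw [hx]; simp⟩
              simp [pvQuoteMask, hcb, hcq]
          have hg := pv_mask_getD M i _ _ hmaski
          have hesc' : ¬ (c = '\\' ∧ i + 1 < s.length) := by
            rw [← hrestlen]; exact hesc
          simp only [pvLoopA, pvScanB, hi, if_true, dif_pos, hg, hesc', ← hc, hcq, if_false]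
          exact ih kA kB (i + 1) start segs (some '"') (by omega) (by omega) (by omega)
            (by simp) (by rw [pv_drop_succ M i _ _ hmaski, ← hrest])

-- ===== VERDICT (by name: the statement is the Claim_ definition above) =====
theorem split_compound_segments_spec : Claim_equal_split_compound_segments := by
  intro cmd _
  unfold Spec_split_compound_segments split_compound_segments split_compound_segments_alt
  by_cases h : cmd = ""
  · simp [h]
  · simp only [h, if_false]
    exact pv_main cmd.toList cmd.toList.length cmd.toList.length cmd.toList.length 0 0 [] none
      (by omega) (by omega) (by omega) (Or.inl rfl) (by simp)
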